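-- pv_equiv track=rewrite | github.com/DmitriySAz/infa_2020_DmitriySAz | lab3/croszeroes.py | check_coords_correct
-- ===== SOURCE A (Python) =====
-- CELL_SIZE = 100
--
-- STEP = 10
--
-- def check_coords_correct(x, y):
--     """Проверка правильности позиции клика мышкой"""
--     for column in range(3):
--         for string in range(3):
--             grid_left = STEP * (column + 1) + CELL_SIZE*column
--             grid_right = STEP * (column + 1) + CELL_SIZE*(column + 1)
--             grid_up = STEP * (string + 1) + CELL_SIZE*string
--             grid_down = STEP * (string + 1) + CELL_SIZE * (string + 1)
--             if grid_left <= x <= grid_right and grid_up <= y <= grid_down: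
--                  return True
-- ===== SOURCE B (Python) =====
-- CELL_SIZE = 100
--
-- STEP = 10
--
-- def in_cell(v):
--     """1-D test: v lies within one of the three 110-wide bands [110*i+10, 110*i+110]."""
--     for i in range(3):
--         if 110 * i + 10 <= v <= 110 * i + 110:
--             return True
--     return False
--
-- def check_coords_correct(x, y):
--     """Проверка правильности позиции клика мышкой"""
--     if in_cell(x) and in_cell(y):
--         return True
-- ===== Notes on version B (the rewrite author's own statement) =====
-- stated objective: simpler
-- what changed: The 3x3 nested scan is replaced by the AND of two independent 1-D band tests (a helper in_cell run once on x and once on y), since the x-bounds depend only on the column and the y-bounds only on the row.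
import Mathlib
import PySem

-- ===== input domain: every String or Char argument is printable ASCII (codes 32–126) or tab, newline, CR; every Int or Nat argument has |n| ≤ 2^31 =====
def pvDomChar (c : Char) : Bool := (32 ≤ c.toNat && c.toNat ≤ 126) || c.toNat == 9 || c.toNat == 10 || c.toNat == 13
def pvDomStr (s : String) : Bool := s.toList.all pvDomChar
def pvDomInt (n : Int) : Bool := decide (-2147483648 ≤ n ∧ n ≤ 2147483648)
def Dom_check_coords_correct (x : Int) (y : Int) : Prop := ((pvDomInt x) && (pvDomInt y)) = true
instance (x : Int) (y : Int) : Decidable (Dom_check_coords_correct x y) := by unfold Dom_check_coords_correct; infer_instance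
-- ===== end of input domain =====

-- ===== PORT A =====
-- B replaces the 3x3 nested scan with two independent 1-D band tests (objective: simpler).
def check_coords_correct (x : Int) (y : Int) : Option Bool :=
  (PySem.List.pyRange 0 3 1).findSome? (fun column =>
    (PySem.List.pyRange 0 3 1).findSome? (fun string =>
      let grid_left := 10 * (column + 1) + 100 * column
      let grid_right := 10 * (column + 1) + 100 * (column + 1)
      let grid_up := 10 * (string + 1) + 100 * string
      let grid_down := 10 * (string + 1) + 100 * (string + 1)
      if grid_left ≤ x ∧ x ≤ grid_right ∧ grid_up ≤ y ∧ y ≤ grid_down then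
        some true
      else
        none))

-- ===== PORT B =====
def in_cell (v : Int) : Bool :=
  (PySem.List.pyRange 0 3 1).any (fun i => decide (110 * i + 10 ≤ v ∧ v ≤ 110 * i + 110))

def check_coords_correct_alt (x : Int) (y : Int) : Option Bool :=
  if in_cell x && in_cell y then some true else none

-- ===== PRECONDITION & SPEC =====
def Spec_check_coords_correct (x : Int) (y : Int) (out : Option Bool) : Prop := out = check_coords_correct_alt x y
instance (x : Int) (y : Int) (out : Option Bool) : Decidable (Spec_check_coords_correct x y out) := by unfold Spec_check_coords_correct; infer_instance

-- ===== CLAIM (what is proved, stated in full; the proofs are below) =====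
def Claim_equal_check_coords_correct : Prop := ∀ (x : Int) (y : Int), Dom_check_coords_correct x y → Spec_check_coords_correct x y (check_coords_correct x y)

-- ===== LEMMAS AND PROOFS =====

-- ===== VERDICT (by name: the statement is the Claim_ definition above) =====
lemma pyRange3 : PySem.List.pyRange 0 3 1 = [0, 1, 2] := by decide

lemma findSome?_if_exists (P : Int → Prop) [DecidablePred P] (l : List Int) :
    l.findSome? (fun i => if P i then some true else none) =
      if ∃ i ∈ l, P i then some true else none := by
  induction l with
  | nil => simp
  | cons a t ih =>
      by_cases h : P a <;>
        simp [h, ih]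

set_option maxHeartbeats 1000000 in
theorem check_coords_correct_spec : Claim_equal_check_coords_correct := by
  intro x y _
  unfold Spec_check_coords_correct check_coords_correct check_coords_correct_alt in_cell
  simp only [pyRange3, findSome?_if_exists]
  refine if_congr ?_ rfl rfl
  simp only [List.exists_mem_cons_iff, List.not_mem_nil, false_and, exists_false, or_false,
    List.any_cons, List.any_nil, Bool.or_false, Bool.and_eq_true, Bool.or_eq_true,
    decide_eq_true_eq]
  omega
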